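-- pv_equiv track=rewrite | github.com/nobe0716/problem_solving | codejam/2020/kickstart/a/c.py | solve
-- ===== SOURCE A (Python) =====
-- import functools
-- import math
-- from typing import List
--
-- def solve(n: int, k: int, elements: List[int]) -> int:
--     @functools.lru_cache(None)
--     def find_k(current_distance, require_distance):
--         return int(math.ceil(current_distance / require_distance)) - 1
--
--     gaps = []
--     for i in range(n - 1):
--         gaps.append(elements[i + 1] - elements[i])
--
--     left, right = 1, max(gaps)
--
--     while left < right:
--         pivot = (right + left) // 2
--         sum_of_k = sum(find_k(gap, pivot) for gap in gaps)
--         if sum_of_k > k: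
--             left = pivot + 1
--         else:
--             right = pivot
--     return left
-- ===== SOURCE B (Python) =====
-- def solve(n, k, elements):
--     # Histogram of consecutive gaps: the candidate check then runs over distinct
--     # gap values only, and the ceil is done in exact integer arithmetic
--     # (ceil(g/m) - 1 == (g - 1) // m for m >= 1).
--     freq = {}
--     for lo, hi in zip(elements[:n - 1], elements[1:n]):
--         g = hi - lo
--         freq[g] = freq.get(g, 0) + 1
--
--     largest = max(freq)  # ValueError when there is no gap, as in A
--
--     def feasible(m):
--         return sum(c * ((g - 1) // m) for g, c in freq.items()) <= k
--
--     def locate(lo, hi):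
--         if lo >= hi:
--             return lo
--         mid = (lo + hi) // 2
--         if feasible(mid):
--             return locate(lo, mid)
--         return locate(mid + 1, hi)
--
--     return locate(1, largest)
-- ===== Notes on version B (the rewrite author's own statement) =====
-- stated objective: faster
-- what changed: B builds the gap list by zipping two slices, aggregates it into a histogram (dict of distinct gap -> multiplicity) so each bisection check sums over distinct gaps only, replaces the per-gap float-ceil plus lru_cache by exact integer arithmetic ((g-1)//m), and runs the bisection as a recursive function instead of a while loop.
import Mathlib
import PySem

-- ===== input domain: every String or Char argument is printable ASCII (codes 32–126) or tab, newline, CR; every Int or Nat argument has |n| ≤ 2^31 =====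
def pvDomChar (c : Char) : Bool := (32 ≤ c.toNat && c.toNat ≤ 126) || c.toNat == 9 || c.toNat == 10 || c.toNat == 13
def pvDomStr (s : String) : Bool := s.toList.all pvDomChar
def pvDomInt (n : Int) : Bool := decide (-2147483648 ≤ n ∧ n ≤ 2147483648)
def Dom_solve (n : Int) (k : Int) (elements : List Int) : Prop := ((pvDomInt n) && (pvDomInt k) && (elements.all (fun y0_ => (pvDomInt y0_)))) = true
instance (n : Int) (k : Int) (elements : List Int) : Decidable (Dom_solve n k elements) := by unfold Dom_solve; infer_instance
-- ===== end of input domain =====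

-- B replaces A's per-gap float-ceil check inside the bisection by an integer-arithmetic
-- check over a histogram of distinct gap values (objective: alternative).

-- ===== PORT A =====
-- int(math.ceil(g / p)) - 1, ported as the exact integer ceiling division -((-g)//p) - 1:
-- on the stated domain (|elements[i]| ≤ 2^31, so |g| ≤ 2^33 < 2^53, and 1 ≤ p) Python's
-- float division is close enough that math.ceil of it equals the exact ceiling.
-- (functools.lru_cache is pure memoisation and has no semantic effect.)
def findK (g : Int) (p : Int) : Int := -(PySem.Int.floordiv (-g) p) - 1

-- the 'while left < right' bisection loop of A
def bisectA (gaps : List Int) (k : Int) (left right : Int) : Int :=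
  if h : left < right then
    let pivot := PySem.Int.floordiv (right + left) 2
    let sumK := gaps.foldl (fun acc g => acc + findK g pivot) 0
    if sumK > k then bisectA gaps k (pivot + 1) right else bisectA gaps k left pivot
  else left
termination_by (right - left).toNat
decreasing_by
  · rw [Int.add_comm right left]
    have hmid := PySem.Int.floordiv_two_mid_bounds (le_of_lt h)
    omega
  · rw [Int.add_comm right left]
    have hmid := PySem.Int.floordiv_two_mid_bounds (le_of_lt h)
    have hlt : PySem.Int.floordiv (left + right) 2 < right :=
      (PySem.Int.floordiv_lt_iff_lt_mul (by omega)).mpr (by omega)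
    omega

def solve (n : Int) (k : Int) (elements : List Int) : Int :=
  let gaps := (PySem.List.pyRange 0 (n - 1) 1).foldl
    (fun acc i => acc ++ [PySem.List.pyGetD elements (i + 1) 0 - PySem.List.pyGetD elements i 0]) []
  let right := (PySem.List.max? gaps (fun y => y)).getD 0   -- max(gaps); Pre_ gives gaps ≠ []
  bisectA gaps k 1 right

-- ===== PORT B =====
-- zip(elements[:n-1], elements[1:n])
def gapPairs (n : Int) (elements : List Int) : List (Int × Int) :=
  List.zip (PySem.List.slice elements none (some (n - 1))) (PySem.List.slice elements (some 1) (some n))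

-- freq[g] = freq.get(g, 0) + 1 over the zipped pairs
def buildFreq (pairs : List (Int × Int)) : PySem.Dict Int Int :=
  pairs.foldl (fun d p => d.insert (p.2 - p.1) (d.getD (p.2 - p.1) 0 + 1)) PySem.Dict.empty

-- sum(c * ((g - 1) // m) for g, c in freq.items()) <= k
def feasible (freq : PySem.Dict Int Int) (kk : Int) (m : Int) : Bool :=
  freq.items.foldl (fun acc p => acc + p.2 * PySem.Int.floordiv (p.1 - 1) m) 0 ≤ kk

def locate (freq : PySem.Dict Int Int) (k : Int) (lo hi : Int) : Int :=
  if h : lo ≥ hi then lo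
  else
    let mid := PySem.Int.floordiv (lo + hi) 2
    if feasible freq k mid then locate freq k lo mid else locate freq k (mid + 1) hi
termination_by (hi - lo).toNat
decreasing_by
  · have hmid := PySem.Int.floordiv_two_mid_bounds (le_of_lt (by omega : lo < hi))
    have hlt : PySem.Int.floordiv (lo + hi) 2 < hi :=
      (PySem.Int.floordiv_lt_iff_lt_mul (by omega)).mpr (by omega)
    omega
  · have hmid := PySem.Int.floordiv_two_mid_bounds (le_of_lt (by omega : lo < hi))
    omega

def solve_alt (n : Int) (k : Int) (elements : List Int) : Int :=
  let freq := buildFreq (gapPairs n elements)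
  let largest := (PySem.List.max? freq.keys (fun y => y)).getD 0   -- max(freq); Pre_ gives a gap
  locate freq k 1 largest

-- ===== PRECONDITION & SPEC =====
-- exactly the inputs on which A returns: n ≤ 1 (and negative n) make gaps empty and
-- max([]) raises ValueError; n > len(elements) makes elements[i + 1] raise IndexError.
def Pre_solve (n : Int) (k : Int) (elements : List Int) : Prop :=
  2 ≤ n ∧ n ≤ (elements.length : Int)
instance (n : Int) (k : Int) (elements : List Int) : Decidable (Pre_solve n k elements) := by
  unfold Pre_solve; infer_instance

def pvWitness_solve : Int × Int × List Int := (3, 1, [0, 5, 9])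

def Spec_solve (n : Int) (k : Int) (elements : List Int) (out : Int) : Prop := out = solve_alt n k elements
instance (n : Int) (k : Int) (elements : List Int) (out : Int) : Decidable (Spec_solve n k elements out) := by unfold Spec_solve; infer_instance

-- ===== CLAIM (what is proved, stated in full; the proofs are below) =====
def Claim_equal_solve : Prop := ∀ (n : Int) (k : Int) (elements : List Int), Dom_solve n k elements → Pre_solve n k elements → Spec_solve n k elements (solve n k elements)

-- ===== LEMMAS AND PROOFS =====

-- ceil(g/m) - 1 = (g - 1) // m for positive m (B's integer reformulation of A's find_k)
theorem findK_eq_floordiv (g m : Int) (hm : 0 < m) :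
    findK g m = PySem.Int.floordiv (g - 1) m := by
  have hq := (PySem.Int.floordiv_eq_iff_of_pos
    (a := g - 1) (b := m) (q := PySem.Int.floordiv (g - 1) m) hm).mp rfl
  have h2 : -PySem.Int.floordiv (-g) m = PySem.Int.floordiv (g - 1) m + 1 := by
    rw [PySem.Int.neg_floordiv_neg_eq_iff_of_pos hm]
    constructor
    · have := hq.1; nlinarith
    · have := hq.2; nlinarith
  unfold findK
  omega

-- summing a function over a list = summing multiplicity * function over the distinct values
theorem sum_count_mul (xs : List Int) (F : Int → Int) :
    ((PySem.Set.ofList xs).map (fun g => (xs.count g : Int) * F g)).sum = (xs.map F).sum := by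
  classical
  have h1 : ((PySem.Set.ofList xs).map (fun g => (xs.count g : Int) * F g)).sum
      = (PySem.Set.ofList xs).toFinset.sum (fun g => (xs.count g : Int) * F g) :=
    (List.sum_toFinset _ (PySem.Set.nodup_ofList xs)).symm
  have hfs : (PySem.Set.ofList xs).toFinset = xs.toFinset := by
    ext a; simp [List.mem_toFinset, PySem.Set.mem_ofList]
  have h2 := Finset.sum_multiset_map_count (xs : Multiset Int) F
  simp only [Multiset.map_coe, Multiset.sum_coe, List.toFinset_coe] at h2
  rw [h1, hfs, h2]
  apply Finset.sum_congr rfl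
  intro a _
  simp

-- B's histogram sum equals A's per-gap sum, for any positive pivot
theorem sum_items_eq (gaps : List Int) (m : Int) (hm : 0 < m) :
    (PySem.Dict.counter gaps).items.foldl
      (fun acc p => acc + p.2 * PySem.Int.floordiv (p.1 - 1) m) 0
    = gaps.foldl (fun acc g => acc + findK g m) 0 := by
  rw [PySem.List.foldl_add, PySem.List.foldl_add, PySem.Dict.items_counter]
  simp only [List.map_map, Function.comp_def, zero_add]
  rw [sum_count_mul gaps (fun g => PySem.Int.floordiv (g - 1) m)]
  congr 1
  apply List.map_congr_left
  intro g _
  rw [findK_eq_floordiv g m hm]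

-- the two bisections walk the same interval sequence
theorem bisect_eq (gaps : List Int) (k : Int) :
    ∀ (N : Nat) (lo hi : Int), (hi - lo).toNat ≤ N → 1 ≤ lo →
      bisectA gaps k lo hi = locate (PySem.Dict.counter gaps) k lo hi := by
  intro N
  induction N with
  | zero =>
    intro lo hi hN hlo
    have hge : ¬ lo < hi := by omega
    rw [bisectA.eq_def, locate.eq_def]
    simp [hge, (show lo ≥ hi by omega)]
  | succ N ih =>
    intro lo hi hN hlo
    by_cases h : lo < hi
    · rw [bisectA.eq_def, locate.eq_def]
      simp only [h, dite_true, show ¬ lo ≥ hi by omega, dite_false]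
      rw [Int.add_comm hi lo]
      have hb := PySem.Int.floordiv_two_mid_bounds (le_of_lt h)
      have hlt : PySem.Int.floordiv (lo + hi) 2 < hi :=
        (PySem.Int.floordiv_lt_iff_lt_mul (by omega)).mpr (by omega)
      have hmpos : (0 : Int) < PySem.Int.floordiv (lo + hi) 2 := by omega
      have hsum := sum_items_eq gaps _ hmpos
      unfold feasible
      rw [hsum]
      by_cases hc : gaps.foldl (fun acc g => acc + findK g (PySem.Int.floordiv (lo + hi) 2)) 0 ≤ k
      · simp only [hc, decide_true, if_true, show ¬ (gaps.foldl (fun acc g => acc + findK g (PySem.Int.floordiv (lo + hi) 2)) 0 > k) by omega, if_false]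
        exact ih lo _ (by omega) hlo
      · simp only [hc, decide_false, show gaps.foldl (fun acc g => acc + findK g (PySem.Int.floordiv (lo + hi) 2)) 0 > k by omega, if_true]
        exact ih _ hi (by omega) (by omega)
    · rw [bisectA.eq_def, locate.eq_def]
      simp [h, (show lo ≥ hi by omega)]

-- B's gap-building loop (freq over zipped slices) is the counter of A's gap list
theorem buildFreq_eq (pairs : List (Int × Int)) :
    buildFreq pairs = PySem.Dict.counter (pairs.map fun p => p.2 - p.1) := by
  unfold buildFreq
  rw [← PySem.Dict.foldl_insert_getD_add_one_eq_counter, List.foldl_map]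

-- A's index loop and B's zip of slices produce the same gap list
theorem gaps_eq (n : Int) (elements : List Int) (h2 : 2 ≤ n)
    (hlen : n ≤ (elements.length : Int)) :
    (PySem.List.pyRange 0 (n - 1) 1).foldl
      (fun acc i => acc ++ [PySem.List.pyGetD elements (i + 1) 0 - PySem.List.pyGetD elements i 0]) []
    = (gapPairs n elements).map (fun p => p.2 - p.1) := by
  obtain ⟨M, hM⟩ : ∃ M : Nat, n = ((M + 1 : Nat) : Int) := ⟨(n - 2).toNat + 1, by omega⟩
  have hML : M + 1 ≤ elements.length := by omega
  subst hM
  have e0 : ((M + 1 : Nat) : Int) - 1 = (M : Int) := by push_cast; ring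
  have e1 : (some (1 : Int)) = some ((1 : Nat) : Int) := rfl
  rw [PySem.List.foldl_append_singleton_eq_map, List.nil_append]
  unfold gapPairs
  rw [e0, e1, PySem.List.slice_to_natCast, PySem.List.slice_natCast,
    PySem.List.pyRange_one, List.map_map]
  apply List.ext_getElem
  · simp
    omega
  · intro i hi1 hi2
    simp only [List.getElem_map, List.getElem_zip, Function.comp_apply]
    have hiL : i < M := by
      simp at hi1; omega
    have e2 : (0 : Int) + (i : Nat) + 1 = (((i + 1 : Nat)) : Int) := by push_cast; ring
    have e3 : (0 : Int) + (i : Nat) = ((i : Nat) : Int) := by ring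
    simp only [List.getElem_range]
    rw [e2, e3, PySem.List.pyGetD_natCast, PySem.List.pyGetD_natCast]
    rw [List.getElem_take, List.getElem_take, List.getElem_drop]
    rw [List.getD_eq_getElem _ _ (by omega), List.getD_eq_getElem _ _ (by omega)]
    have e4 : 1 + i = i + 1 := by omega
    simp [e4]

-- max over the counter's keys = max over the underlying list
theorem max_keys_eq (gaps : List Int) (hne : gaps ≠ []) :
    (PySem.List.max? (PySem.Set.ofList gaps) (fun y => y)).getD 0
    = (PySem.List.max? gaps (fun y => y)).getD 0 := by
  rcases hA : PySem.List.max? gaps (fun y => y) with _ | M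
  · exact absurd ((PySem.List.max?_eq_none_iff gaps _).mp hA) hne
  rcases hB : PySem.List.max? (PySem.Set.ofList gaps) (fun y => y) with _ | M'
  · have : PySem.Set.ofList gaps = [] := (PySem.List.max?_eq_none_iff _ _).mp hB
    have : M ∈ PySem.Set.ofList gaps := by
      rw [PySem.Set.mem_ofList]; exact PySem.List.max?_mem hA
    simp_all
  have hMmem : M ∈ gaps := PySem.List.max?_mem hA
  have hM'mem : M' ∈ gaps := (PySem.Set.mem_ofList gaps M').mp (PySem.List.max?_mem hB)
  have h1 : M' ≤ M := PySem.List.max?_isMax hA M' hM'mem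
  have h2 : M ≤ M' := PySem.List.max?_isMax hB M ((PySem.Set.mem_ofList gaps M).mpr hMmem)
  simp [le_antisymm h1 h2]

-- ===== VERDICT (by name: the statement is the Claim_ definition above) =====
theorem solve_spec : Claim_equal_solve := by
  intro n k elements _ hpre
  obtain ⟨h2, hlen⟩ := hpre
  simp only [Spec_solve, solve, solve_alt]
  rw [buildFreq_eq, ← gaps_eq n elements h2 hlen]
  set gaps := (PySem.List.pyRange 0 (n - 1) 1).foldl
    (fun acc i => acc ++ [PySem.List.pyGetD elements (i + 1) 0 - PySem.List.pyGetD elements i 0]) []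
    with hg
  have hlg : gaps.length = (n - 1 - 0).toNat := by
    rw [hg, PySem.List.foldl_append_singleton_eq_map, List.nil_append, List.length_map,
      PySem.List.length_pyRange_one]
  have hne : gaps ≠ [] := by
    intro hcon
    rw [hcon] at hlg
    simp at hlg
    omega
  rw [PySem.Dict.keys_counter, max_keys_eq gaps hne]
  exact bisect_eq gaps k _ 1 _ (le_refl _) (le_refl 1)
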